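-- pv_equiv track=rewrite | github.com/SAG145/Project-Euler | PEP518 - Prime Triples and Geometric Sequences.py | prime_factors_with_repetitions
-- ===== SOURCE A (Python) =====
-- import math
--
-- def prime_factors_with_repetitions(n,primes_list = [],m = 2):
--     if n == 1:
--         return primes_list
--     if n % 2 == 0:
--         return prime_factors_with_repetitions(n // 2,primes_list + [2])
--     else:
--         if m == 2:
--             m = 3
--         for k in range(m,int(math.sqrt(n)) + 1,2):
--             if n % k == 0:
--                 return prime_factors_with_repetitions(n // k,primes_list + [k],m)
--         return primes_list + [n]
-- ===== SOURCE B (Python) =====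
-- def prime_factors_with_repetitions(n, primes_list=[], m=2):
--     # Iterative trial division: strip factors of 2, then scan odd candidates
--     # upward with a moving pointer d instead of restarting the range scan
--     # on every factor found (A re-enters the function and rescans from m).
--     factors = list(primes_list)
--     if n != 1 and n % 2 == 0:
--         while n % 2 == 0:
--             factors.append(2)
--             n //= 2
--         m = 2  # A discards the caller's m as soon as it divides by 2
--     if n == 1:
--         return factors
--     d = 3 if m == 2 else m
--     while d * d <= n:
--         if n % d == 0:
--             factors.append(d)
--             n //= d
--         else:
--             d += 2
--     factors.append(n)
--     return factors
-- ===== Notes on version B (the rewrite author's own statement) =====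
-- stated objective: alternative
-- what changed: Replaces A's recursion (which rebuilds the accumulator list and restarts the range(m,isqrt(n)+1,2) scan from m after every factor found) by a single iterative trial-division loop with a moving candidate pointer d that never goes back.
import Mathlib
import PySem

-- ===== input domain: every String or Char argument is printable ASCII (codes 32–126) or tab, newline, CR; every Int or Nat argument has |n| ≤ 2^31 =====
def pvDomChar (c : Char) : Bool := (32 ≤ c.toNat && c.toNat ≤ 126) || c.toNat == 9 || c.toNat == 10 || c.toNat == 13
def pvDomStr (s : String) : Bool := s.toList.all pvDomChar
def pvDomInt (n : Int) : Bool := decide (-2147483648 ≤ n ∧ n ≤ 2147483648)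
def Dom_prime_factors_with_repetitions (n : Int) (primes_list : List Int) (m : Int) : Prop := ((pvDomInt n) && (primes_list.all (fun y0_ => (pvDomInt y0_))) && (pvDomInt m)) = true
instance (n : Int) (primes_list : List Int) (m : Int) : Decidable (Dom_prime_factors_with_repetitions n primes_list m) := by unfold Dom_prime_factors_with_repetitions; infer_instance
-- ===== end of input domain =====

-- B replaces A's recursion (which restarts the range(m, isqrt(n)+1, 2) scan from m after
-- every factor found) by one iterative trial-division loop with a moving pointer d.

-- ===== PORT A =====
-- fuel-indexed transliteration of A's recursion (the fuel only makes it total; on Pre_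
-- the fuel n.natAbs + 1 is never exhausted).  int(math.sqrt(n)) is ported as
-- Nat.sqrt n.toNat, which is exact for 0 ≤ n ≤ 2^31 (Dom): there the C double sqrt
-- rounds so that int(math.sqrt(n)) = isqrt(n).
def pvAf : Nat → Int → List Int → Int → List Int
  | 0, _, _, _ => []
  | f+1, n, primes_list, m =>
    if n = 1 then primes_list
    else if PySem.Int.mod n 2 = 0 then
      pvAf f (PySem.Int.floordiv n 2) (primes_list ++ [2]) 2
    else
      -- if m == 2: m = 3 — the reassigned m is written inline below
      -- for k in range(m, int(math.sqrt(n)) + 1, 2): the first k with n % k == 0 recurses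
      match (PySem.List.pyRange (if m = 2 then 3 else m) ((Nat.sqrt n.toNat : Int) + 1) 2).find?
              (fun k => PySem.Int.mod n k == 0) with
      | some k => pvAf f (PySem.Int.floordiv n k) (primes_list ++ [k]) (if m = 2 then 3 else m)
      | none => primes_list ++ [n]

def prime_factors_with_repetitions (n : Int) (primes_list : List Int) (m : Int) : List Int :=
  pvAf (n.natAbs + 1) n primes_list m

-- ===== PORT B =====
-- while n % 2 == 0: factors.append(2); n //= 2
def pvEvenLoop : Nat → Int → List Int → Int × List Int
  | 0, n, fs => (n, fs)
  | f+1, n, fs =>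
    if PySem.Int.mod n 2 = 0 then pvEvenLoop f (PySem.Int.floordiv n 2) (fs ++ [2])
    else (n, fs)

-- while d * d <= n: if n % d == 0: factors.append(d); n //= d  else: d += 2 — then append n
def pvOddLoop : Nat → Int → Int → List Int → List Int
  | 0, n, _, fs => fs ++ [n]
  | f+1, n, d, fs =>
    if d * d ≤ n then
      if PySem.Int.mod n d = 0 then pvOddLoop f (PySem.Int.floordiv n d) d (fs ++ [d])
      else pvOddLoop f n (d + 2) fs
    else fs ++ [n]

def prime_factors_with_repetitions_alt (n : Int) (primes_list : List Int) (m : Int) : List Int :=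
  if n ≠ 1 ∧ PySem.Int.mod n 2 = 0 then
    let p := pvEvenLoop (n.natAbs + 1) n primes_list
    if p.1 = 1 then p.2 else pvOddLoop (2 * p.1.natAbs + 2) p.1 3 p.2  -- m was reset to 2, so d = 3
  else
    if n = 1 then primes_list
    else pvOddLoop (2 * n.natAbs + 2) n (if m = 2 then 3 else m) primes_list

-- ===== PRECONDITION & SPEC =====
-- Pre_ is exactly where the Python A returns: it raises (or recurses forever) for n ≤ 0,
-- and for odd n > 1 with m < 2 (the scan then reaches k = 1 — infinite recursion — or
-- k ≤ 0 — ZeroDivisionError / math.sqrt ValueError); for even n the m argument is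
-- discarded on the first division by 2, and n = 1 returns immediately.
def Pre_prime_factors_with_repetitions (n : Int) (primes_list : List Int) (m : Int) : Prop :=
  1 ≤ n ∧ ((2 : Int) ∣ n ∨ n = 1 ∨ 2 ≤ m)
instance (n : Int) (primes_list : List Int) (m : Int) : Decidable (Pre_prime_factors_with_repetitions n primes_list m) := by unfold Pre_prime_factors_with_repetitions; infer_instance

def pvWitness_prime_factors_with_repetitions : Int × List Int × Int := (180, [], 2)

def Spec_prime_factors_with_repetitions (n : Int) (primes_list : List Int) (m : Int) (out : List Int) : Prop := out = prime_factors_with_repetitions_alt n primes_list m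
instance (n : Int) (primes_list : List Int) (m : Int) (out : List Int) : Decidable (Spec_prime_factors_with_repetitions n primes_list m out) := by unfold Spec_prime_factors_with_repetitions; infer_instance

-- ===== CLAIM (what is proved, stated in full; the proofs are below) =====
def Claim_equal_prime_factors_with_repetitions : Prop := ∀ (n : Int) (primes_list : List Int) (m : Int), Dom_prime_factors_with_repetitions n primes_list m → Pre_prime_factors_with_repetitions n primes_list m → Spec_prime_factors_with_repetitions n primes_list m (prime_factors_with_repetitions n primes_list m)

-- ===== LEMMAS AND PROOFS =====

-- range(a, b, 2) unrolls one element
lemma pyRange_two_nil (a b : Int) (h : b ≤ a) :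
    PySem.List.pyRange a b 2 = [] := by
  rw [PySem.List.pyRange_of_pos a b (by norm_num)]
  simp [show ¬ a < b by omega]

lemma pyRange_two_cons (a b : Int) (h : a < b) :
    PySem.List.pyRange a b 2 = a :: PySem.List.pyRange (a+2) b 2 := by
  rw [PySem.List.pyRange_of_pos a b (by norm_num),
      PySem.List.pyRange_of_pos (a+2) b (by norm_num)]
  by_cases h2 : a + 2 < b
  · rw [if_pos h, if_pos h2]
    have hc : ((b - a + 2 - 1) / 2).toNat = ((b - (a+2) + 2 - 1) / 2).toNat + 1 := by omega
    rw [hc, List.range_succ_eq_map]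
    simp [List.map_map, Function.comp]
    intro k _
    ring
  · rw [if_pos h, if_neg h2]
    have hc : ((b - a + 2 - 1) / 2).toNat = 1 := by omega
    simp [hc, List.range_succ]

-- the find? of A's for-loop misses: no progression element below hi divides n
lemma find_none_aux (n : Int) : ∀ (c : Nat) (a hi : Int), (hi - a).toNat ≤ c →
    (∀ k, a ≤ k → k < hi → (2:Int) ∣ (k - a) → ¬ (k ∣ n)) →
    (PySem.List.pyRange a hi 2).find? (fun k => PySem.Int.mod n k == 0) = none := by
  intro c
  induction c with
  | zero =>
    intro a hi hc _
    rw [pyRange_two_nil a hi (by omega)]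
    rfl
  | succ c ih =>
    intro a hi hc hinv
    by_cases hab : a < hi
    · rw [pyRange_two_cons a hi hab]
      rw [List.find?_cons_of_neg]
      · exact ih (a+2) hi (by omega) (fun k hk1 hk2 hk3 => hinv k (by omega) hk2 (by omega))
      · simp only [beq_iff_eq, PySem.Int.mod_eq_zero_iff_dvd]
        exact hinv a le_rfl hab ⟨0, by ring⟩
    · rw [pyRange_two_nil a hi (by omega)]; rfl

-- the find? of A's for-loop returns the first dividing progression element d
lemma find_some_aux (n : Int) : ∀ (c : Nat) (a d hi : Int), (d - a).toNat ≤ c →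
    a ≤ d → (2:Int) ∣ (d - a) → d < hi →
    (∀ k, a ≤ k → k < d → (2:Int) ∣ (k - a) → ¬ (k ∣ n)) → d ∣ n →
    (PySem.List.pyRange a hi 2).find? (fun k => PySem.Int.mod n k == 0) = some d := by
  intro c
  induction c with
  | zero =>
    intro a d hi hc had hpar hdhi hinv hdvd
    have : a = d := by omega
    subst this
    rw [pyRange_two_cons a hi hdhi, List.find?_cons_of_pos]
    simp only [beq_iff_eq, PySem.Int.mod_eq_zero_iff_dvd]
    exact hdvd
  | succ c ih =>
    intro a d hi hc had hpar hdhi hinv hdvd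
    by_cases hae : a = d
    · subst hae
      rw [pyRange_two_cons a hi hdhi, List.find?_cons_of_pos]
      simp only [beq_iff_eq, PySem.Int.mod_eq_zero_iff_dvd]
      exact hdvd
    · have ha2 : a + 2 ≤ d := by omega
      rw [pyRange_two_cons a hi (by omega), List.find?_cons_of_neg]
      · exact ih (a+2) d hi (by omega) ha2 (by omega) hdhi
          (fun k hk1 hk2 hk3 => hinv k (by omega) hk2 (by omega)) hdvd
      · simp only [beq_iff_eq, PySem.Int.mod_eq_zero_iff_dvd]
        exact hinv a le_rfl (by omega) ⟨0, by ring⟩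

-- int(math.sqrt(n)) bound ↔ square bound
lemma sqrt_bridge (n d : Int) (hn : 0 ≤ n) (hd : 0 ≤ d) :
    d < ((Nat.sqrt n.toNat : Nat) : Int) + 1 ↔ d * d ≤ n := by
  rw [Int.lt_add_one_iff]
  rcases Int.eq_ofNat_of_zero_le hd with ⟨d', rfl⟩
  rcases Int.eq_ofNat_of_zero_le hn with ⟨n', rfl⟩
  rw [Int.toNat_natCast]
  exact_mod_cast Nat.le_sqrt

-- A's odd phase exits with fs ++ [n] once the remaining progression cannot divide n
lemma pvAf_exit (f : Nat) (n d m' : Int) (fs : List Int)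
    (hn : 3 ≤ n) (hodd : ¬ (2:Int) ∣ n) (hm : 3 ≤ m')
    (hinv : ∀ k, m' ≤ k → k < d → (2:Int) ∣ (k - m') → ¬ (k ∣ n))
    (hbig : n < d * d) (hd0 : 0 ≤ d) :
    pvAf (f+1) n fs m' = fs ++ [n] := by
  have hmod : ¬ PySem.Int.mod n 2 = 0 := by
    rw [PySem.Int.mod_eq_zero_iff_dvd]; exact hodd
  have hm2 : (if m' = 2 then (3:Int) else m') = m' := if_neg (by omega)
  have hfind : (PySem.List.pyRange m' ((Nat.sqrt n.toNat : Int) + 1) 2).find?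
      (fun k => PySem.Int.mod n k == 0) = none := by
    apply find_none_aux n ((((Nat.sqrt n.toNat : Nat) : Int) + 1 - m').toNat)
    · omega
    · intro k hk1 hk2 hk3
      have hk0 : 0 ≤ k := by omega
      have hkk : k * k ≤ n := (sqrt_bridge n k (by omega) hk0).mp hk2
      have hkd : k < d := by nlinarith
      exact hinv k hk1 hkd hk3
  simp only [pvAf, if_neg (show ¬ n = 1 by omega), if_neg hmod, hm2, hfind]

-- MAIN LEMMA: A's recursion from m' = B's odd loop at pointer d, under the invariant
-- that no progression element below d divides n
lemma odd_equiv : ∀ (fB fA : Nat) (n d m' : Int) (fs : List Int),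
    3 ≤ n → ¬ (2:Int) ∣ n → 3 ≤ m' → m' ≤ d → (2:Int) ∣ (d - m') →
    (∀ k, m' ≤ k → k < d → (2:Int) ∣ (k - m') → ¬ (k ∣ n)) →
    n.toNat + 1 ≤ fA → 2 * n.toNat + 3 ≤ fB + d.toNat →
    pvAf fA n fs m' = pvOddLoop fB n d fs := by
  intro fB
  induction fB with
  | zero =>
    intro fA n d m' fs hn hodd hm hmd hpar hinv hfA hfB
    obtain ⟨f, rfl⟩ : ∃ f, fA = f + 1 := ⟨fA - 1, by omega⟩
    have hd : 2 * n + 3 ≤ d := by omega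
    have hbig : n < d * d := by nlinarith
    rw [pvAf_exit f n d m' fs hn hodd hm hinv hbig (by omega)]
    rfl
  | succ fB ih =>
    intro fA n d m' fs hn hodd hm hmd hpar hinv hfA hfB
    obtain ⟨f, rfl⟩ : ∃ f, fA = f + 1 := ⟨fA - 1, by omega⟩
    have hd3 : 3 ≤ d := by omega
    by_cases hdd : d * d ≤ n
    · have hdhi : d < ((Nat.sqrt n.toNat : Nat) : Int) + 1 :=
        (sqrt_bridge n d (by omega) (by omega)).mpr hdd
      by_cases hdvd : d ∣ n
      · -- B divides by d; A's find? returns d and A recurses on n/d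
        have hmodd : PySem.Int.mod n d = 0 := (PySem.Int.mod_eq_zero_iff_dvd n d).mpr hdvd
        have hLHS : pvAf (f+1) n fs m' = pvAf f (PySem.Int.floordiv n d) (fs ++ [d]) m' := by
          have hmod2 : ¬ PySem.Int.mod n 2 = 0 := by
            rw [PySem.Int.mod_eq_zero_iff_dvd]; exact hodd
          have hm2 : (if m' = 2 then (3:Int) else m') = m' := if_neg (by omega)
          have hfind : (PySem.List.pyRange m' ((Nat.sqrt n.toNat : Nat) + 1 : Int) 2).find?
              (fun k => PySem.Int.mod n k == 0) = some d :=
            find_some_aux n (d - m').toNat m' d _ (by omega) hmd hpar hdhi hinv hdvd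
          simp only [pvAf, if_neg (show ¬ n = 1 by omega), if_neg hmod2, hm2, hfind]
        rw [hLHS]
        obtain ⟨q, rfl⟩ := hdvd
        have hq1 : 1 ≤ q := by nlinarith
        have hdq : d ≤ q := by nlinarith
        have hflo : PySem.Int.floordiv (d * q) d = q := by
          rw [PySem.Int.floordiv_eq_ediv_of_pos (by omega)]
          exact Int.mul_ediv_cancel_left q (by omega)
        rw [hflo]
        have hstep : pvOddLoop (fB+1) (d*q) d fs = pvOddLoop fB q d (fs ++ [d]) := by
          simp only [pvOddLoop, if_pos hdd, if_pos hmodd, hflo]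
        rw [hstep]
        have hqn : q + 2 ≤ d * q := by nlinarith
        exact ih f q d m' (fs ++ [d]) (by omega) (fun ⟨r, hr⟩ => hodd ⟨d * r, by rw [hr]; ring⟩)
          hm hmd hpar
          (fun k hk1 hk2 hk3 hkq => hinv k hk1 hk2 hk3 (hkq.mul_left d)) (by omega) (by omega)
      · -- d does not divide n: B moves the pointer to d + 2, A is unchanged
        have hmodd : ¬ PySem.Int.mod n d = 0 := by
          rw [PySem.Int.mod_eq_zero_iff_dvd]; exact hdvd
        have hstep : pvOddLoop (fB+1) n d fs = pvOddLoop fB n (d+2) fs := by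
          simp only [pvOddLoop, if_pos hdd, if_neg hmodd]
        rw [hstep]
        apply ih (f+1) n (d+2) m' fs hn hodd hm (by omega) (by omega)
        · intro k hk1 hk2 hk3
          have : k = d ∨ k < d := by omega
          rcases this with rfl | hlt
          · exact hdvd
          · exact hinv k hk1 hlt hk3
        · omega
        · omega
    · -- loop exit: both return fs ++ [n]
      have hstep : pvOddLoop (fB+1) n d fs = fs ++ [n] := by
        simp only [pvOddLoop, if_neg hdd]
      rw [hstep]
      exact pvAf_exit f n d m' fs hn hodd hm hinv (by omega) (by omega)

-- substituting m ← (3 if m == 2 else m) does not change A's value on odd n ≠ 1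
lemma pvAf_m_switch (f : Nat) (n m : Int) (fs : List Int)
    (hn1 : ¬ n = 1) (_hodd : ¬ PySem.Int.mod n 2 = 0) :
    pvAf (f+1) n fs m = pvAf (f+1) n fs (if m = 2 then 3 else m) := by
  by_cases hm : m = 2 <;> simp [pvAf, hn1, hm]

-- pvEvenLoop's value does not depend on the fuel once it is ≥ n.natAbs
lemma evenLoop_fuel : ∀ (N : Nat) (n : Int) (fs : List Int) (f₁ f₂ : Nat),
    n.toNat ≤ N → 1 ≤ n → n.natAbs ≤ f₁ → n.natAbs ≤ f₂ →
    pvEvenLoop f₁ n fs = pvEvenLoop f₂ n fs := by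
  intro N
  induction N with
  | zero => intro n fs f₁ f₂ hN h1 _ _; omega
  | succ N ih =>
    intro n fs f₁ f₂ hN h1 hf1 hf2
    obtain ⟨g₁, rfl⟩ : ∃ g, f₁ = g + 1 := ⟨f₁ - 1, by omega⟩
    obtain ⟨g₂, rfl⟩ : ∃ g, f₂ = g + 1 := ⟨f₂ - 1, by omega⟩
    by_cases hmod : PySem.Int.mod n 2 = 0
    · obtain ⟨q, rfl⟩ := (PySem.Int.mod_eq_zero_iff_dvd n 2).mp hmod
      have hq1 : 1 ≤ q := by omega
      have hflo : PySem.Int.floordiv (2 * q) 2 = q := by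
        rw [PySem.Int.floordiv_eq_ediv_of_pos (by omega)]
        exact Int.mul_ediv_cancel_left q (by omega)
      simp only [pvEvenLoop, if_pos hmod, hflo]
      exact ih q (fs ++ [2]) g₁ g₂ (by omega) hq1 (by omega) (by omega)
    · simp only [pvEvenLoop, if_neg hmod]

-- proof-side name for the body of B past its first branch
def pvBCore (n : Int) (fs : List Int) : List Int :=
  let p := pvEvenLoop (n.natAbs + 1) n fs
  if p.1 = 1 then p.2 else pvOddLoop (2 * p.1.natAbs + 2) p.1 3 p.2

lemma pvBCore_step (q : Int) (fs : List Int) (hq : 1 ≤ q) :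
    pvBCore (2 * q) fs = pvBCore q (fs ++ [2]) := by
  have hmod : PySem.Int.mod (2 * q) 2 = 0 := (PySem.Int.mod_eq_zero_iff_dvd _ 2).mpr ⟨q, rfl⟩
  have hflo : PySem.Int.floordiv (2 * q) 2 = q := by
    rw [PySem.Int.floordiv_eq_ediv_of_pos (by omega)]
    exact Int.mul_ediv_cancel_left q (by omega)
  have hE : pvEvenLoop ((2*q).natAbs + 1) (2*q) fs = pvEvenLoop (q.natAbs + 1) q (fs ++ [2]) := by
    obtain ⟨g, hg⟩ : ∃ g, (2*q).natAbs + 1 = g + 1 := ⟨(2*q).natAbs, rfl⟩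
    rw [hg]
    simp only [pvEvenLoop, if_pos hmod, hflo]
    exact evenLoop_fuel q.toNat q (fs ++ [2]) g (q.natAbs + 1) le_rfl hq (by omega) (by omega)
  unfold pvBCore
  rw [hE]

-- A started with m = 2 (or reaching its even branch) equals B's even phase + odd loop from 3
lemma even_core : ∀ (N : Nat) (n m : Int) (fs : List Int) (fA : Nat),
    n.toNat ≤ N → 1 ≤ n → n.toNat + 1 ≤ fA → ((2:Int) ∣ n ∨ m = 2) →
    pvAf fA n fs m = pvBCore n fs := by
  intro N
  induction N with
  | zero => intro n m fs fA hN h1 _ _; omega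
  | succ N ih =>
    intro n m fs fA hN h1 hfA hm
    obtain ⟨f, rfl⟩ : ∃ f, fA = f + 1 := ⟨fA - 1, by omega⟩
    by_cases h1' : n = 1
    · subst h1'
      have hmod : ¬ PySem.Int.mod (1:Int) 2 = 0 := by decide
      have hE : pvEvenLoop ((1:Int).natAbs + 1) 1 fs = (1, fs) := by
        simp only [pvEvenLoop, if_neg hmod]
      simp only [pvAf, pvBCore, hE]
      simp
    · by_cases h2 : (2:Int) ∣ n
      · obtain ⟨q, rfl⟩ := h2
        have hq1 : 1 ≤ q := by omega
        have hmod : PySem.Int.mod (2 * q) 2 = 0 := (PySem.Int.mod_eq_zero_iff_dvd _ 2).mpr ⟨q, rfl⟩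
        have hflo : PySem.Int.floordiv (2 * q) 2 = q := by
          rw [PySem.Int.floordiv_eq_ediv_of_pos (by omega)]
          exact Int.mul_ediv_cancel_left q (by omega)
        have hstep : pvAf (f+1) (2*q) fs m = pvAf f q (fs ++ [2]) 2 := by
          simp only [pvAf, if_neg h1', if_pos hmod, hflo]
        rw [hstep, pvBCore_step q fs hq1]
        exact ih q 2 (fs ++ [2]) f (by omega) hq1 (by omega) (Or.inr rfl)
      · -- n odd, n ≠ 1 ⇒ here m = 2 and A's odd phase starts at 3, like B's
        have hm2 : m = 2 := by
          rcases hm with h | h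
          · exact absurd h h2
          · exact h
        subst hm2
        have hn3 : 3 ≤ n := by omega
        have hmod : ¬ PySem.Int.mod n 2 = 0 := by
          rw [PySem.Int.mod_eq_zero_iff_dvd]; exact h2
        have hE : pvEvenLoop (n.natAbs + 1) n fs = (n, fs) := by
          obtain ⟨g, hg⟩ : ∃ g, n.natAbs + 1 = g + 1 := ⟨n.natAbs, rfl⟩
          rw [hg]; simp only [pvEvenLoop, if_neg hmod]
        rw [pvAf_m_switch f n 2 fs h1' hmod, if_pos rfl]
        rw [odd_equiv (2 * n.natAbs + 2) (f+1) n 3 3 fs hn3 h2 (by omega) le_rfl ⟨0, by ring⟩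
          (fun k hk1 hk2 _ => by omega) (by omega) (by omega)]
        simp only [pvBCore, hE, if_neg h1']

-- ===== VERDICT (by name: the statement is the Claim_ definition above) =====
theorem prime_factors_with_repetitions_spec : Claim_equal_prime_factors_with_repetitions := by
  intro n pl m _ hPre
  obtain ⟨hn, hc⟩ := hPre
  unfold Spec_prime_factors_with_repetitions prime_factors_with_repetitions
    prime_factors_with_repetitions_alt
  by_cases h1 : n = 1
  · subst h1
    have hmod : ¬ PySem.Int.mod (1:Int) 2 = 0 := by decide
    simp [pvAf]
  · by_cases h2 : PySem.Int.mod n 2 = 0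
    · have hdvd : (2:Int) ∣ n := (PySem.Int.mod_eq_zero_iff_dvd n 2).mp h2
      rw [if_pos ⟨h1, h2⟩]
      exact even_core n.toNat n m pl (n.natAbs + 1) le_rfl hn (by omega) (Or.inl hdvd)
    · have hodd : ¬ (2:Int) ∣ n := fun h => h2 ((PySem.Int.mod_eq_zero_iff_dvd n 2).mpr h)
      have hm2 : 2 ≤ m := by
        rcases hc with h | h | h
        · exact absurd h hodd
        · exact absurd h h1
        · exact h
      have hn3 : 3 ≤ n := by omega
      rw [if_neg (fun h => h2 h.2), if_neg h1]
      obtain ⟨f, hf⟩ : ∃ f, n.natAbs + 1 = f + 1 := ⟨n.natAbs, rfl⟩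
      rw [hf, pvAf_m_switch f n m pl h1 h2]
      have hm3 : 3 ≤ (if m = 2 then (3:Int) else m) := by
        by_cases hm : m = 2 <;> simp [hm] <;> omega
      exact odd_equiv (2 * n.natAbs + 2) (f+1) n _ _ pl hn3 hodd hm3 le_rfl ⟨0, by ring⟩
        (fun k hk1 hk2 _ => by omega) (by omega) (by omega)
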